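-- pv_equiv track=rewrite | github.com/kwang1012/RASCal-NSDI-26-Artifacts | experiments/parse_7_1_result.py | _partition_ha_lines
-- ===== SOURCE A (Python) =====
-- def _partition_ha_lines(ha_lines):
--     door_lines = []
--     thermostat_lines = []
--     shade_lines = []
--
--     current_section = None
--     for line in ha_lines:
--         if "cover.rpi_device_door" in line:
--             current_section = "door"
--         elif "climate.rpi_device_thermostat" in line:
--             current_section = "thermostat"
--         elif "cover.rpi_device_shade" in line:
--             current_section = "shade"
--
--         if current_section == "door":
--             door_lines.append(line)
--         elif current_section == "thermostat":
--             thermostat_lines.append(line)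
--         elif current_section == "shade":
--             shade_lines.append(line)
--
--     return door_lines, thermostat_lines, shade_lines
-- ===== SOURCE B (Python) =====
-- def _classify(cur, line):
--     if "cover.rpi_device_door" in line:
--         return "door"
--     if "climate.rpi_device_thermostat" in line:
--         return "thermostat"
--     if "cover.rpi_device_shade" in line:
--         return "shade"
--     return cur
--
--
-- def _partition_ha_lines(ha_lines):
--     labels = []
--     cur = None
--     for line in ha_lines:
--         cur = _classify(cur, line)
--         labels.append(cur)
--     pairs = list(zip(ha_lines, labels))
--     return ([l for l, s in pairs if s == "door"],
--             [l for l, s in pairs if s == "thermostat"],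
--             [l for l, s in pairs if s == "shade"])
-- ===== Notes on version B (the rewrite author's own statement) =====
-- stated objective: alternative
-- what changed: Replaced the single fused classify-and-append loop by a labelling pass (one label per line via a _classify helper) followed by three separate zip-based filtering comprehensions.
import Mathlib
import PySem

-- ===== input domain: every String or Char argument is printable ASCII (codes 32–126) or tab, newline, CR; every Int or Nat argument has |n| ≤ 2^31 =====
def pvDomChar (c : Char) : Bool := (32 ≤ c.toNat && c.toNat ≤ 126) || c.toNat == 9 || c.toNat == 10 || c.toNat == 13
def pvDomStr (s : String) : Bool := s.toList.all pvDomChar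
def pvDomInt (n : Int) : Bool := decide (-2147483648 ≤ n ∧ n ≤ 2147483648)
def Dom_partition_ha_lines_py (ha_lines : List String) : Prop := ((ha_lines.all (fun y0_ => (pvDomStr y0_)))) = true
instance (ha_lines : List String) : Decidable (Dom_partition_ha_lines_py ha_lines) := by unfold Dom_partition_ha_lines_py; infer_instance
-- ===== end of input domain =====

-- B replaces A's fused classify-and-append loop with a labelling pass plus three zip-filter passes (alternative decomposition, same cost).


-- ===== PORT A =====
-- one loop iteration of A: update current_section, then append the line to the matching bucket
def pvStepA (st : (List String × List String × List String) × Option String) (line : String) :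
    (List String × List String × List String) × Option String :=
  let cur : Option String :=
    if PySem.Str.isIn "cover.rpi_device_door" line then some "door"
    else if PySem.Str.isIn "climate.rpi_device_thermostat" line then some "thermostat"
    else if PySem.Str.isIn "cover.rpi_device_shade" line then some "shade"
    else st.2
  let d := st.1.1
  let t := st.1.2.1
  let s := st.1.2.2
  if cur = some "door" then ((d ++ [line], t, s), cur)
  else if cur = some "thermostat" then ((d, t ++ [line], s), cur)
  else if cur = some "shade" then ((d, t, s ++ [line]), cur)
  else ((d, t, s), cur)

def partition_ha_lines_py (ha_lines : List String) : List String × List String × List String :=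
  (ha_lines.foldl pvStepA (([], [], []), none)).1

-- ===== PORT B =====
-- B's _classify helper
def pvClassify (cur : Option String) (line : String) : Option String :=
  if PySem.Str.isIn "cover.rpi_device_door" line then some "door"
  else if PySem.Str.isIn "climate.rpi_device_thermostat" line then some "thermostat"
  else if PySem.Str.isIn "cover.rpi_device_shade" line then some "shade"
  else cur

-- B's first pass: one label per line
def pvLabels (cur : Option String) : List String → List (Option String)
  | [] => []
  | l :: ls => (pvClassify cur l) :: pvLabels (pvClassify cur l) ls

def partition_ha_lines_py_alt (ha_lines : List String) : List String × List String × List String :=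
  let pairs := ha_lines.zip (pvLabels none ha_lines)
  (pairs.filterMap (fun p => if p.2 = some "door" then some p.1 else none),
   pairs.filterMap (fun p => if p.2 = some "thermostat" then some p.1 else none),
   pairs.filterMap (fun p => if p.2 = some "shade" then some p.1 else none))

-- ===== PRECONDITION & SPEC =====
def Spec_partition_ha_lines_py (ha_lines : List String) (out : List String × List String × List String) : Prop := out = partition_ha_lines_py_alt ha_lines
instance (ha_lines : List String) (out : List String × List String × List String) : Decidable (Spec_partition_ha_lines_py ha_lines out) := by unfold Spec_partition_ha_lines_py; infer_instance

-- ===== CLAIM (what is proved, stated in full; the proofs are below) =====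
def Claim_equal_partition_ha_lines_py : Prop := ∀ (ha_lines : List String), Dom_partition_ha_lines_py ha_lines → Spec_partition_ha_lines_py ha_lines (partition_ha_lines_py ha_lines)

-- ===== LEMMAS AND PROOFS =====
-- what B selects for a given section, starting from state cur on a suffix
def pvPick (sec : String) (cur : Option String) (ls : List String) : List String :=
  (ls.zip (pvLabels cur ls)).filterMap (fun p => if p.2 = some sec then some p.1 else none)

lemma pvPick_nil (sec : String) (cur : Option String) : pvPick sec cur [] = [] := rfl

lemma pvPick_cons (sec : String) (cur : Option String) (l : String) (ls : List String) :
    pvPick sec cur (l :: ls) =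
      (if pvClassify cur l = some sec then [l] else []) ++ pvPick sec (pvClassify cur l) ls := by
  simp only [pvPick, pvLabels, List.zip_cons_cons, List.filterMap_cons]
  split_ifs <;> simp

-- loop invariant: A's fold extends the accumulators by exactly the lines B selects
lemma pvLoop_eq (ls : List String) : ∀ (cur : Option String) (d t s : List String),
    (ls.foldl pvStepA ((d, t, s), cur)).1 =
      (d ++ pvPick "door" cur ls, t ++ pvPick "thermostat" cur ls, s ++ pvPick "shade" cur ls) := by
  induction ls with
  | nil => intro cur d t s; simp [pvPick_nil]
  | cons l ls ih =>
    intro cur d t s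
    have hstep : pvStepA ((d, t, s), cur) l =
        (if pvClassify cur l = some "door" then ((d ++ [l], t, s), pvClassify cur l)
         else if pvClassify cur l = some "thermostat" then ((d, t ++ [l], s), pvClassify cur l)
         else if pvClassify cur l = some "shade" then ((d, t, s ++ [l]), pvClassify cur l)
         else ((d, t, s), pvClassify cur l)) := rfl
    simp only [List.foldl_cons, hstep, pvPick_cons]
    split_ifs with h1 h2 h3 <;>
      simp_all [List.append_assoc]

theorem pv_main (ha_lines : List String) :
    partition_ha_lines_py ha_lines = partition_ha_lines_py_alt ha_lines := by
  have := pvLoop_eq ha_lines none [] [] []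
  simp only [partition_ha_lines_py, this, List.nil_append]
  rfl

-- ===== VERDICT (by name: the statement is the Claim_ definition above) =====
theorem partition_ha_lines_py_spec : Claim_equal_partition_ha_lines_py := by
  intro ha_lines _
  exact pv_main ha_lines
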